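-- pv_equiv track=rewrite | github.com/kbpark9898/Algorithm_Solving | 04_Binary_Search/PG_Immigration.py | p_search
-- ===== SOURCE A (Python) =====
-- def condition(mid, times, n):
--     result = 0
--     for time in times:
--         result+=mid//time
--     if result >= n:
--         return True
--     else:
--         return False
--
-- def p_search(left, right, times, n):
--     while left<=right:
--         mid = (left+right)//2
--         check = condition(mid, times, n)
--         if not check:
--             left = mid + 1
--         else:
--             right = mid -1
--     return left
-- ===== SOURCE B (Python) =====
-- def p_search(left, right, times, n):
--     if left > right:
--         return left
--     mid = (left + right) // 2
--     if sum(mid // t for t in times) >= n: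
--         return p_search(left, mid - 1, times, n)
--     return p_search(mid + 1, right, times, n)
-- ===== Notes on version B (the rewrite author's own statement) =====
-- stated objective: simpler
-- what changed: Replaced the iterative while-loop with a mutated (left,right) state plus the accumulator-loop helper 'condition' by a self-contained recursive binary search whose predicate is an inline sum over a generator.
import Mathlib
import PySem

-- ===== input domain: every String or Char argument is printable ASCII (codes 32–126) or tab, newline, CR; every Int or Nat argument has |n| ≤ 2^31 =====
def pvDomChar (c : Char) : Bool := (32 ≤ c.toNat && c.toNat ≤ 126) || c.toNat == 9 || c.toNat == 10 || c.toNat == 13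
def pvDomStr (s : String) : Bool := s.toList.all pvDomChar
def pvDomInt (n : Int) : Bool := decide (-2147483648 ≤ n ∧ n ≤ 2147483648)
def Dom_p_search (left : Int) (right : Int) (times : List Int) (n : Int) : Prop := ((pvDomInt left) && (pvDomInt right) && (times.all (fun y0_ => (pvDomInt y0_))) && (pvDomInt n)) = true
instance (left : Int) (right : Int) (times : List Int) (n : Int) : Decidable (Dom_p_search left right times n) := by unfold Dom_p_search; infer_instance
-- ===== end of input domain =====

-- B replaces A's iterative while-loop + accumulator helper by a recursive binary search with an
-- inline sum-over-map predicate (objective: simpler; same cost).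

-- ===== PORT A =====
def condition (mid : Int) (times : List Int) (n : Int) : Bool :=
  let result := times.foldl (fun result time => result + PySem.Int.floordiv mid time) 0
  if result ≥ n then true else false

-- A's while-loop, with a fuel guard making the non-structural recursion total; fuel
-- (right + 1 - left).toNat is sufficient since the interval shrinks each iteration.
def pSearchLoop : Nat → Int → Int → List Int → Int → Int
  | 0, left, _, _, _ => left
  | fuel + 1, left, right, times, n =>
    if left ≤ right then
      let mid := PySem.Int.floordiv (left + right) 2
      let check := condition mid times n
      if !check then pSearchLoop fuel (mid + 1) right times n
      else pSearchLoop fuel left (mid - 1) times n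
    else left

def p_search (left : Int) (right : Int) (times : List Int) (n : Int) : Int :=
  pSearchLoop (right + 1 - left).toNat left right times n

-- ===== PORT B =====
-- B's recursion, with the same sufficient fuel guard.
def pSearchRec : Nat → Int → Int → List Int → Int → Int
  | 0, left, _, _, _ => left
  | fuel + 1, left, right, times, n =>
    if left > right then left
    else
      let mid := PySem.Int.floordiv (left + right) 2
      if (times.map (fun t => PySem.Int.floordiv mid t)).sum ≥ n then
        pSearchRec fuel left (mid - 1) times n
      else
        pSearchRec fuel (mid + 1) right times n

def p_search_alt (left : Int) (right : Int) (times : List Int) (n : Int) : Int :=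
  pSearchRec (right + 1 - left).toNat left right times n

-- ===== PRECONDITION & SPEC =====
-- Pre_ excludes exactly the inputs where Python A raises ZeroDivisionError:
-- 0 ∈ times with a nonempty search interval (left ≤ right).
def Pre_p_search (left : Int) (right : Int) (times : List Int) (n : Int) : Prop :=
  right < left ∨ (0 : Int) ∉ times
instance (left : Int) (right : Int) (times : List Int) (n : Int) : Decidable (Pre_p_search left right times n) := by unfold Pre_p_search; infer_instance
def pvWitness_p_search : Int × Int × List Int × Int := (1, 20, [2, 3], 5)

def Spec_p_search (left : Int) (right : Int) (times : List Int) (n : Int) (out : Int) : Prop := out = p_search_alt left right times n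
instance (left : Int) (right : Int) (times : List Int) (n : Int) (out : Int) : Decidable (Spec_p_search left right times n out) := by unfold Spec_p_search; infer_instance

-- ===== CLAIM (what is proved, stated in full; the proofs are below) =====
def Claim_equal_p_search : Prop := ∀ (left : Int) (right : Int) (times : List Int) (n : Int), Dom_p_search left right times n → Pre_p_search left right times n → Spec_p_search left right times n (p_search left right times n)

-- ===== LEMMAS AND PROOFS =====

theorem foldl_floordiv_eq_sum (mid : Int) (times : List Int) (a : Int) :
    times.foldl (fun r t => r + PySem.Int.floordiv mid t) a
      = a + (times.map (fun t => PySem.Int.floordiv mid t)).sum := by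
  induction times generalizing a with
  | nil => simp
  | cons t ts ih => simp [List.foldl_cons, ih]; ring

theorem condition_eq (mid : Int) (times : List Int) (n : Int) :
    condition mid times n = ((times.map (fun t => PySem.Int.floordiv mid t)).sum ≥ n : Bool) := by
  simp [condition, foldl_floordiv_eq_sum]

theorem pSearchLoop_eq_rec (fuel : Nat) (left right : Int) (times : List Int) (n : Int) :
    pSearchLoop fuel left right times n = pSearchRec fuel left right times n := by
  induction fuel generalizing left right with
  | zero => rfl
  | succ fuel ih =>
    simp only [pSearchLoop, pSearchRec, condition_eq]
    by_cases hlr : left ≤ right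
    · rw [if_pos hlr, if_neg (by omega : ¬ left > right)]
      rcases le_or_gt n ((times.map (fun t => PySem.Int.floordiv (PySem.Int.floordiv (left + right) 2) t)).sum) with h | h
      · rw [if_neg (by simp only [Bool.not_eq_true', decide_eq_false_iff_not]; omega), if_pos h]
        exact ih _ _
      · rw [if_pos (by simp only [Bool.not_eq_true', decide_eq_false_iff_not]; omega), if_neg (by omega)]
        exact ih _ _
    · rw [if_neg hlr, if_pos (by omega : left > right)]

-- ===== VERDICT (by name: the statement is the Claim_ definition above) =====
theorem p_search_spec : Claim_equal_p_search := by
  intro l r ts n _ _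
  exact pSearchLoop_eq_rec _ l r ts n
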